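-- pv_equiv track=rewrite | github.com/omothm/unfence | summary.py | _parse_shadows
-- ===== SOURCE A (Python) =====
-- def _parse_shadows(shadow_list):
--     out  = {}
--     seen = set()
--     for s in shadow_list:
--         shr = s.get("shadower", "")
--         shd = s.get("shadowed", "")
--         ex  = s.get("example", "")
--         if shr and shd and (shr, shd) not in seen:
--             seen.add((shr, shd))
--             out.setdefault(shr, []).append((shd, ex))
--     return out
-- ===== SOURCE B (Python) =====
-- def _parse_shadows(shadow_list):
--     # pass 1: collect (shadower, shadowed, example) triples with truthy shadower/shadowed
--     triples = []
--     for s in shadow_list: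
--         shr = s.get("shadower", "")
--         shd = s.get("shadowed", "")
--         ex = s.get("example", "")
--         if shr and shd:
--             triples.append((shr, shd, ex))
--     # pass 2: first-wins dedup on the (shadower, shadowed) pair by scanning the kept list
--     dedup = []
--     for t in triples:
--         if not any(u[0] == t[0] and u[1] == t[1] for u in dedup):
--             dedup.append(t)
--     # pass 3: shadowers in first-appearance order
--     keys = []
--     for t in dedup:
--         if t[0] not in keys:
--             keys.append(t[0])
--     # pass 4: group by shadower with a nested filter scan
--     return {k: [(t[1], t[2]) for t in dedup if t[0] == k] for k in keys}
-- ===== Notes on version B (the rewrite author's own statement) =====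
-- stated objective: alternative
-- what changed: Replaces the fused single loop carrying a dict plus a 'seen' set with four staged list passes: collect valid triples, first-wins dedup by scanning the kept list, collect shadowers in first-appearance order, then group by a nested filter scan per shadower.
import Mathlib
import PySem

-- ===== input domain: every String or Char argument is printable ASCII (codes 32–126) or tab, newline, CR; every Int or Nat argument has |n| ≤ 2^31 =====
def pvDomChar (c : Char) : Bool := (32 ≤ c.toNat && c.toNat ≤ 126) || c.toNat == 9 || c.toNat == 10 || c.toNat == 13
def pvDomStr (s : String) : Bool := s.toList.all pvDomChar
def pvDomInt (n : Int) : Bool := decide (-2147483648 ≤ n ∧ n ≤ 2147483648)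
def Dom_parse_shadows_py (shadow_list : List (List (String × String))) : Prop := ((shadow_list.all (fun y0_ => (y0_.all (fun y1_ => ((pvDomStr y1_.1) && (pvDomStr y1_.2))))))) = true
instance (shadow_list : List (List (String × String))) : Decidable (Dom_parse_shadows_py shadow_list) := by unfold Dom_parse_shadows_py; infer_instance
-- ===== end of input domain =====

-- B replaces the fused dict+'seen'-set loop by four staged list passes (collect valid
-- triples, first-wins dedup by scanning the kept list, first-appearance key list,
-- group by a nested filter scan); alternative decomposition, not faster.

-- ===== PORT A =====
def parse_shadows_py (shadow_list : List (List (String × String))) : List (String × List (String × String)) :=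
  (shadow_list.foldl
    (fun st s =>
      let shr := (PySem.Dict.mk s).getD "shadower" ""
      let shd := (PySem.Dict.mk s).getD "shadowed" ""
      let ex  := (PySem.Dict.mk s).getD "example" ""
      if shr != "" && shd != "" && !(PySem.Set.contains st.2 (shr, shd)) then
        (st.1.modify shr [] (· ++ [(shd, ex)]), PySem.Set.add st.2 (shr, shd))
      else st)
    ((PySem.Dict.empty : PySem.Dict String (List (String × String))),
     (PySem.Set.empty : PySem.Set (String × String)))).1.items

-- ===== PORT B =====
def parse_shadows_py_alt (shadow_list : List (List (String × String))) : List (String × List (String × String)) :=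
  -- pass 1: valid triples
  let triples : List (String × String × String) :=
    shadow_list.foldl
      (fun acc s =>
        let shr := (PySem.Dict.mk s).getD "shadower" ""
        let shd := (PySem.Dict.mk s).getD "shadowed" ""
        let ex  := (PySem.Dict.mk s).getD "example" ""
        if shr != "" && shd != "" then acc ++ [(shr, shd, ex)] else acc)
      []
  -- pass 2: first-wins dedup on the (shadower, shadowed) pair, scanning the kept list
  let ded : List (String × String × String) :=
    triples.foldl
      (fun ded t => if ded.any (fun u => u.1 == t.1 && u.2.1 == t.2.1) then ded else ded ++ [t])
      []
  -- pass 3: shadowers in first-appearance order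
  let keys : List String :=
    ded.foldl (fun ks t => if ks.contains t.1 then ks else ks ++ [t.1]) []
  -- pass 4: group by shadower with a nested filter scan
  keys.map (fun k => (k, (ded.filter (fun t => t.1 == k)).map (fun t => (t.2.1, t.2.2))))

-- ===== PRECONDITION & SPEC =====
def Spec_parse_shadows_py (shadow_list : List (List (String × String))) (out : List (String × List (String × String))) : Prop := out = parse_shadows_py_alt shadow_list
instance (shadow_list : List (List (String × String))) (out : List (String × List (String × String))) : Decidable (Spec_parse_shadows_py shadow_list out) := by unfold Spec_parse_shadows_py; infer_instance

-- ===== CLAIM (what is proved, stated in full; the proofs are below) =====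
def Claim_equal_parse_shadows_py : Prop := ∀ (shadow_list : List (List (String × String))), Dom_parse_shadows_py shadow_list → Spec_parse_shadows_py shadow_list (parse_shadows_py shadow_list)

-- ===== LEMMAS AND PROOFS =====

/-- The dict A accumulates, as a pure fold over an already-deduplicated triple list. -/
def pvG (ts : List (String × String × String)) : PySem.Dict String (List (String × String)) :=
  ts.foldl (fun d t => d.modify t.1 [] (· ++ [t.2])) PySem.Dict.empty

/-- B's triple-collecting step (pass 1). -/
def pvTripStep (acc : List (String × String × String)) (s : List (String × String)) :
    List (String × String × String) :=
  let shr := (PySem.Dict.mk s).getD "shadower" ""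
  let shd := (PySem.Dict.mk s).getD "shadowed" ""
  let ex  := (PySem.Dict.mk s).getD "example" ""
  if shr != "" && shd != "" then acc ++ [(shr, shd, ex)] else acc

/-- B's dedup step (pass 2). -/
def pvDedStep (ded : List (String × String × String)) (t : String × String × String) :
    List (String × String × String) :=
  if ded.any (fun u => u.1 == t.1 && u.2.1 == t.2.1) then ded else ded ++ [t]

/-- A's fused filter+dedup, acting directly on the raw list. -/
def pvFused (ded : List (String × String × String)) (s : List (String × String)) :
    List (String × String × String) :=
  let shr := (PySem.Dict.mk s).getD "shadower" ""
  let shd := (PySem.Dict.mk s).getD "shadowed" ""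
  let ex  := (PySem.Dict.mk s).getD "example" ""
  if shr != "" && shd != "" && !(ded.any (fun u => u.1 == shr && u.2.1 == shd)) then
    ded ++ [(shr, shd, ex)]
  else ded

lemma pv_set_contains_add (s : PySem.Set (String × String)) (x y : String × String) :
    (PySem.Set.add s x).contains y = ((y == x) || s.contains y) := by
  simp only [PySem.Set.add, PySem.Set.contains]
  by_cases hx : x ∈ s
  · rcases eq_or_ne y x with rfl | hne
    · simp [hx]
    · simp [hx, hne]
  · rcases eq_or_ne y x with rfl | hne
    · simp [hx]
    · simp [hx, hne]

/-- Loop invariant: A's fused fold over the remaining raw list, started from the dict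
    grouping `ded` and a set answering pair membership as `ded` does, computes the
    grouping of the fused filter+dedup fold. -/
lemma pv_inv (l : List (List (String × String)))
    (ded : List (String × String × String)) (seen : PySem.Set (String × String))
    (h : ∀ a b : String, seen.contains (a, b) = ded.any (fun u => u.1 == a && u.2.1 == b)) :
    (l.foldl
      (fun st s =>
        let shr := (PySem.Dict.mk s).getD "shadower" ""
        let shd := (PySem.Dict.mk s).getD "shadowed" ""
        let ex  := (PySem.Dict.mk s).getD "example" ""
        if shr != "" && shd != "" && !(PySem.Set.contains st.2 (shr, shd)) then
          (st.1.modify shr [] (· ++ [(shd, ex)]), PySem.Set.add st.2 (shr, shd))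
        else st)
      (pvG ded, seen)).1
    = pvG (l.foldl pvFused ded) := by
  induction l generalizing ded seen with
  | nil => simp
  | cons s t ih =>
    simp only [List.foldl_cons]
    set shr := (PySem.Dict.mk s).getD "shadower" "" with hshr
    set shd := (PySem.Dict.mk s).getD "shadowed" "" with hshd
    set ex  := (PySem.Dict.mk s).getD "example" "" with hex
    rw [show pvFused ded s
        = (if shr != "" && shd != "" && !(ded.any (fun u => u.1 == shr && u.2.1 == shd)) then
            ded ++ [(shr, shd, ex)] else ded) from rfl]
    rw [h shr shd]
    by_cases hc : (shr != "" && shd != "" && !(ded.any (fun u => u.1 == shr && u.2.1 == shd))) = true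
    · simp only [hc, if_pos]
      have hg : pvG (ded ++ [(shr, shd, ex)]) = (pvG ded).modify shr [] (· ++ [(shd, ex)]) := by
        simp [pvG, List.foldl_append]
      have hseen : ∀ a b : String,
          (PySem.Set.add seen (shr, shd)).contains (a, b)
          = (ded ++ [(shr, shd, ex)]).any (fun u => u.1 == a && u.2.1 == b) := by
        intro a b
        rw [pv_set_contains_add, h a b]
        have hbeq : ((a, b) == (shr, shd)) = (shr == a && shd == b) := by
          rcases eq_or_ne a shr with rfl | h1
          · rcases eq_or_ne b shd with rfl | h2
            · simp
            · have e1 : (shd == b) = false := beq_eq_false_iff_ne.mpr (Ne.symm h2)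
              have e2 : ((shr, b) == (shr, shd)) = false := beq_eq_false_iff_ne.mpr (by simp [h2])
              simp [e1, e2]
          · have e1 : (shr == a) = false := beq_eq_false_iff_ne.mpr (Ne.symm h1)
            have e2 : ((a, b) == (shr, shd)) = false := beq_eq_false_iff_ne.mpr (by simp [h1])
            simp [e1, e2]
        rw [hbeq, List.any_append]
        simp [Bool.or_comm]
      rw [← hg]
      exact ih (ded ++ [(shr, shd, ex)]) (PySem.Set.add seen (shr, shd)) hseen
    · simp only [Bool.not_eq_true] at hc
      simp only [hc, if_neg, Bool.false_eq_true, not_false_eq_true]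
      exact ih ded seen h

/-- Pass 1's fold from any accumulator splits off the accumulator. -/
lemma pv_trip_acc (l : List (List (String × String))) (acc : List (String × String × String)) :
    l.foldl pvTripStep acc = acc ++ l.foldl pvTripStep [] := by
  induction l generalizing acc with
  | nil => simp
  | cons s t ih =>
    simp only [List.foldl_cons]
    rw [ih (pvTripStep acc s), ih (pvTripStep [] s)]
    simp only [pvTripStep]
    split_ifs <;> simp

/-- Fusing pass 1 into pass 2: the fused filter+dedup fold equals deduplicating the
    collected triples. -/
lemma pv_fuse (l : List (List (String × String))) (ded : List (String × String × String)) :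
    l.foldl pvFused ded = (l.foldl pvTripStep []).foldl pvDedStep ded := by
  induction l generalizing ded with
  | nil => simp
  | cons s t ih =>
    simp only [List.foldl_cons]
    rw [ih (pvFused ded s), pv_trip_acc t (pvTripStep [] s), List.foldl_append]
    congr 1
    simp only [pvFused, pvTripStep]
    by_cases h1 : ((PySem.Dict.mk s).getD "shadower" "" != "") = true <;>
      by_cases h2 : ((PySem.Dict.mk s).getD "shadowed" "" != "") = true <;>
      by_cases ha : (ded.any (fun u => u.1 == (PySem.Dict.mk s).getD "shadower" ""
          && u.2.1 == (PySem.Dict.mk s).getD "shadowed" "")) = true <;>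
      simp [pvDedStep, h1, h2, ha]

/-- Pass 3 computes `set.update` of the shadower projection. -/
lemma pv_keys (ded : List (String × String × String)) (ks : List String) :
    ded.foldl (fun ks t => if ks.contains t.1 then ks else ks ++ [t.1]) ks
    = PySem.Set.update ks (ded.map (·.1)) := by
  induction ded generalizing ks with
  | nil => rfl
  | cons t r ih =>
    have hstep : (if ks.contains t.1 then ks else ks ++ [t.1]) = PySem.Set.add ks t.1 := by
      by_cases h : t.1 ∈ ks <;> simp [PySem.Set.add, PySem.Set.contains, h]
    simp only [List.foldl_cons, List.map_cons, hstep, ih]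
    rfl

/-- A's grouped dict, listed: first-appearance keys paired with the filtered values. -/
lemma pv_items (ded : List (String × String × String)) :
    (pvG ded).items
    = (PySem.Set.update [] (ded.map (·.1))).map
        (fun k => (k, (ded.filter (fun t => t.1 == k)).map (·.2))) := by
  have hnd : (pvG ded).keys.Nodup := by
    have := PySem.Dict.nodup_keys_foldl_modify_key ded (·.1) []
      (fun _ t => (· ++ [t.2])) PySem.Dict.empty (by simp)
    simpa [pvG] using this
  have hkeys : (pvG ded).keys = PySem.Set.update [] (ded.map (·.1)) := by
    have := PySem.Dict.keys_foldl_modify_key (l := ded) (key := (·.1)) (d0 := [])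
      (f := fun _ t => (· ++ [t.2])) (d := PySem.Dict.empty)
    simpa [pvG] using this
  have hval : ∀ k, (pvG ded).getD k []
      = (ded.filter (fun t => t.1 == k)).map (·.2) := by
    intro k
    have := PySem.Dict.getD_foldl_modify_append (l := ded) (d := PySem.Dict.empty) (c := k)
    simpa [pvG] using this
  rw [PySem.Dict.items_eq_map_keys (pvG ded) hnd [], hkeys]
  exact List.map_congr_left (fun k _ => by rw [hval k])

-- ===== VERDICT (by name: the statement is the Claim_ definition above) =====
theorem parse_shadows_py_spec : Claim_equal_parse_shadows_py := by
  intro shadow_list _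
  unfold Spec_parse_shadows_py
  have h := pv_inv shadow_list [] PySem.Set.empty
    (by intro a b; simp [PySem.Set.contains, PySem.Set.empty])
  rw [show pvG [] = PySem.Dict.empty from rfl] at h
  unfold parse_shadows_py
  rw [h, pv_fuse, pv_items]
  unfold parse_shadows_py_alt
  simp only [pv_keys]
  rfl
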